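-- pv_equiv track=rewrite | github.com/zharovlad/Operations-research-and-game-theory | 2/main.py | get_queues_states_view
-- ===== SOURCE A (Python) =====
-- def get_queues_states_view(states, full_time):
--     max_length_of_queue = {}
--     for state in states.values():
--         for machine, queue in state.items():
--             if max_length_of_queue.setdefault(machine, 0) < len(queue):
--                 max_length_of_queue[machine] = len(queue)
--
--     view_of_queues = {}
--     for machine, length in max_length_of_queue.items():
--         if length > 0:
--             view_of_queues[machine] = tuple([' \' ']*full_time for _ in range(length))
--
--     times = sorted(states.keys())
--     converted = zip(times, [*times[1:], full_time], (states[t] for t in times))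
--
--     for time, new_time, machine_queues in converted:
--         for machine, queue in machine_queues.items():
--             for i, detail in enumerate(queue):
--                 view_of_queues[machine][i][time:new_time] = [' ' + str(detail) + ' '] * (new_time - time)
--
--     return sorted(view_of_queues.items(), key=lambda item: item[0])
-- ===== SOURCE B (Python) =====
-- def get_queues_states_view(states, full_time):
--     times = sorted(states)
--     intervals = list(zip(times, [*times[1:], full_time]))
--
--     max_len = {}
--     for t in times:
--         for machine, queue in states[t].items():
--             if len(queue) > max_len.get(machine, 0):
--                 max_len[machine] = len(queue)
--
--     out = []
--     for machine in sorted(m for m, n in max_len.items() if n > 0):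
--         seq = []
--         for t, nt in intervals:
--             queue = states[t].get(machine)
--             if queue is not None:
--                 seq.append((t, nt, queue))
--         rows = []
--         for i in range(max_len[machine]):
--             row = [" ' "] * full_time
--             for t, nt, queue in seq:
--                 if i < len(queue):
--                     row[t:nt] = [' ' + str(queue[i]) + ' '] * (nt - t)
--             rows.append(row)
--         out.append((machine, tuple(rows)))
--     return out
-- ===== Notes on version B (the rewrite author's own statement) =====
-- stated objective: alternative
-- what changed: B drops A's mutable dict-of-grids updated interval-by-interval (triple nested loop with slice assignment into shared state) and instead emits the sorted machines directly, building each queue-row independently by one functional fold over the time intervals.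
import Mathlib
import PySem

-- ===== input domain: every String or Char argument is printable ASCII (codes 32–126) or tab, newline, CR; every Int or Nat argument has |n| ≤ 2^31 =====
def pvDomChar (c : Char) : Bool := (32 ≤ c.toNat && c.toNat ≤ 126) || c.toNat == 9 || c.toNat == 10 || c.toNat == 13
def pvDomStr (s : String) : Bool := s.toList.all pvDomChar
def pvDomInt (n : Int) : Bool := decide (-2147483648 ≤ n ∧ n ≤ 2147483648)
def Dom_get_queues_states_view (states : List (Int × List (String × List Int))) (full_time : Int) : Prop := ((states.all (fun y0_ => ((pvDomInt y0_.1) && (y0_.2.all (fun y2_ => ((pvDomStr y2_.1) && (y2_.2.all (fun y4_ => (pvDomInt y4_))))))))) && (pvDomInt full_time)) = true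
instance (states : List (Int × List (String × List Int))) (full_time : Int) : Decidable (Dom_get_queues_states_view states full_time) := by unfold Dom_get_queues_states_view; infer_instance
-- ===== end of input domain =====

-- B rebuilds the same view machine-by-machine (one functional fold per queue row) instead of
-- mutating a dict of grids interval-by-interval; same value everywhere, objective: alternative.

-- shared input decoding: the Python argument is a dict[int, dict[str, list[int]]];
-- the association-list argument denotes that dict (later duplicate keys overwrite, first position kept)
def pvToStatesDict (states : List (Int × List (String × List Int))) :
    PySem.Dict Int (PySem.Dict String (List Int)) :=
  PySem.Dict.ofList (states.map (fun p => (p.1, PySem.Dict.ofList p.2)))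

-- shared helper: Python's step-1 slice assignment  xs[a:b] = repl  (exact, incl. negative /
-- out-of-range bounds: both Pythons perform literally this statement)
def pySpliceAssign {α : Type} (xs : List α) (a b : Int) (repl : List α) : List α :=
  let a' := PySem.List.clampIdx xs.length a
  let b' := max a' (PySem.List.clampIdx xs.length b)
  xs.take a' ++ repl ++ xs.drop b'

-- ===== PORT A =====
def get_queues_states_view (states : List (Int × List (String × List Int))) (full_time : Int) : List (String × List (List String)) :=
  let statesD := pvToStatesDict states
  let max_length_of_queue : PySem.Dict String Int :=
    statesD.values.foldl (fun d state =>
      state.items.foldl (fun d mq =>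
        let d := d.setdefault mq.1 0
        if d.getD mq.1 0 < (mq.2.length : Int) then d.insert mq.1 (mq.2.length : Int) else d) d)
      PySem.Dict.empty
  let view_of_queues : PySem.Dict String (List (List String)) :=
    max_length_of_queue.items.foldl (fun v ml =>
      if 0 < ml.2 then
        v.insert ml.1 (List.replicate ml.2.toNat (List.replicate full_time.toNat " ' "))
      else v) PySem.Dict.empty
  let times := PySem.List.sorted statesD.keys (fun t => t)
  let converted := times.zip (times.tail ++ [full_time])
  -- states[t] below: t ∈ statesD.keys, so the getD default is never used (no KeyError);
  -- view_of_queues[machine]: a machine with a nonempty queue always has max length > 0, so the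
  -- modify default [] is never used either (no KeyError), and row index i is always in range
  let view_of_queues := converted.foldl (fun v tnt =>
      (statesD.getD tnt.1 PySem.Dict.empty).items.foldl (fun v mq =>
        (PySem.List.enumerate mq.2).foldl (fun v id_ =>
          v.modify mq.1 [] (fun g =>
            PySem.List.pySetD g id_.1
              (pySpliceAssign (PySem.List.pyGetD g id_.1 []) tnt.1 tnt.2
                (List.replicate (tnt.2 - tnt.1).toNat (" " ++ PySem.Int.toStr id_.2 ++ " "))))) v) v)
      view_of_queues
  PySem.List.sorted view_of_queues.items (fun item => item.1)

-- ===== PORT B =====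
def get_queues_states_view_alt (states : List (Int × List (String × List Int))) (full_time : Int) : List (String × List (List String)) :=
  let statesD := pvToStatesDict states
  let times := PySem.List.sorted statesD.keys (fun t => t)
  let intervals := times.zip (times.tail ++ [full_time])
  let max_len : PySem.Dict String Int :=
    times.foldl (fun d t =>
      (statesD.getD t PySem.Dict.empty).items.foldl (fun d mq =>
        if d.getD mq.1 0 < (mq.2.length : Int) then d.insert mq.1 (mq.2.length : Int) else d) d)
      PySem.Dict.empty
  let machines := PySem.List.sorted ((max_len.items.filter (fun p => 0 < p.2)).map (fun p => p.1)) (fun m => m)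
  machines.map (fun machine =>
    let seq := intervals.foldl (fun acc tnt =>
      match (statesD.getD tnt.1 PySem.Dict.empty).get? machine with
      | some queue => acc ++ [(tnt.1, tnt.2, queue)]
      | none => acc) []
    (machine,
      (List.range (max_len.getD machine 0).toNat).map (fun (i : Nat) =>
        seq.foldl (fun row tq =>
          if (i : Int) < (tq.2.2.length : Int) then
            pySpliceAssign row tq.1 tq.2.1
              (List.replicate (tq.2.1 - tq.1).toNat (" " ++ PySem.Int.toStr (PySem.List.pyGetD tq.2.2 (i : Int) 0) ++ " "))
          else row)
          (List.replicate full_time.toNat " ' "))))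

-- ===== PRECONDITION & SPEC =====
def Spec_get_queues_states_view (states : List (Int × List (String × List Int))) (full_time : Int) (out : List (String × List (List String))) : Prop := out = get_queues_states_view_alt states full_time
instance (states : List (Int × List (String × List Int))) (full_time : Int) (out : List (String × List (List String))) : Decidable (Spec_get_queues_states_view states full_time out) := by unfold Spec_get_queues_states_view; infer_instance

-- ===== CLAIM (what is proved, stated in full; the proofs are below) =====
def Claim_equal_get_queues_states_view : Prop := ∀ (states : List (Int × List (String × List Int))) (full_time : Int), Dom_get_queues_states_view states full_time → Spec_get_queues_states_view states full_time (get_queues_states_view states full_time)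

-- ===== LEMMAS AND PROOFS =====

-- proof-side names for the stages of the two folds
def pvCellRepl (t nt d : Int) : List String :=
  List.replicate (nt - t).toNat (" " ++ PySem.Int.toStr d ++ " ")

def pvF (tnt : Int × Int) (id_ : Int × Int) (g : List (List String)) : List (List String) :=
  PySem.List.pySetD g id_.1
    (pySpliceAssign (PySem.List.pyGetD g id_.1 []) tnt.1 tnt.2 (pvCellRepl tnt.1 tnt.2 id_.2))

def pvU (tnt : Int × Int) (p : String × List Int)
    (v : PySem.Dict String (List (List String))) : PySem.Dict String (List (List String)) :=
  (PySem.List.enumerate p.2).foldl (fun v id_ => v.modify p.1 [] (pvF tnt id_)) v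

def pvUpdGrid (tnt : Int × Int) (q : List Int) (g : List (List String)) : List (List String) :=
  (PySem.List.enumerate q).foldl (fun g id_ => pvF tnt id_ g) g

def pvGStep (S : PySem.Dict Int (PySem.Dict String (List Int))) (m : String)
    (g : List (List String)) (tnt : Int × Int) : List (List String) :=
  match (S.getD tnt.1 PySem.Dict.empty).get? m with
  | some q => pvUpdGrid tnt q g
  | none => g

def pvMXstep (m : String) (a : Int) (p : String × List Int) : Int :=
  if p.1 = m then max a (p.2.length : Int) else a

def pvInnerA (d : PySem.Dict String Int) (p : String × List Int) : PySem.Dict String Int :=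
  if (d.setdefault p.1 0).getD p.1 0 < (p.2.length : Int) then
    (d.setdefault p.1 0).insert p.1 (p.2.length : Int)
  else d.setdefault p.1 0

def pvInnerB (d : PySem.Dict String Int) (p : String × List Int) : PySem.Dict String Int :=
  if d.getD p.1 0 < (p.2.length : Int) then d.insert p.1 (p.2.length : Int) else d

def pvMaxA (S : PySem.Dict Int (PySem.Dict String (List Int))) : PySem.Dict String Int :=
  S.values.foldl (fun d st => st.items.foldl pvInnerA d) PySem.Dict.empty

def pvTimes (S : PySem.Dict Int (PySem.Dict String (List Int))) : List Int :=
  PySem.List.sorted S.keys (fun t => t)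

def pvMaxB (S : PySem.Dict Int (PySem.Dict String (List Int))) : PySem.Dict String Int :=
  (pvTimes S).foldl (fun d t => (S.getD t PySem.Dict.empty).items.foldl pvInnerB d) PySem.Dict.empty

def pvPairsA (S : PySem.Dict Int (PySem.Dict String (List Int))) : List (String × List Int) :=
  S.values.flatMap (fun st => st.items)

def pvML (S : PySem.Dict Int (PySem.Dict String (List Int))) (m : String) : Int :=
  (pvPairsA S).foldl (pvMXstep m) 0

def pvInitGrid (ft : Int) (n : Int) : List (List String) :=
  List.replicate n.toNat (List.replicate ft.toNat " ' ")

def pvView0 (S : PySem.Dict Int (PySem.Dict String (List Int))) (ft : Int) :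
    PySem.Dict String (List (List String)) :=
  (pvMaxA S).items.foldl (fun v ml =>
    if 0 < ml.2 then v.insert ml.1 (pvInitGrid ft ml.2) else v) PySem.Dict.empty

def pvI (S : PySem.Dict Int (PySem.Dict String (List Int))) (ft : Int) : List (Int × Int) :=
  (pvTimes S).zip ((pvTimes S).tail ++ [ft])

def pvViewFinal (S : PySem.Dict Int (PySem.Dict String (List Int))) (ft : Int) :
    PySem.Dict String (List (List String)) :=
  (pvI S ft).foldl (fun v tnt => ((S.getD tnt.1 PySem.Dict.empty).items).foldl (fun v p => pvU tnt p v) v)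
    (pvView0 S ft)

def pvRow (S : PySem.Dict Int (PySem.Dict String (List Int))) (ft : Int) (m : String) (i : Nat) :
    List String :=
  (pvI S ft).foldl (fun row tnt =>
    match (S.getD tnt.1 PySem.Dict.empty).get? m with
    | some queue =>
      if (i : Int) < (queue.length : Int) then
        pySpliceAssign row tnt.1 tnt.2
          (List.replicate (tnt.2 - tnt.1).toNat (" " ++ PySem.Int.toStr (PySem.List.pyGetD queue (i : Int) 0) ++ " "))
      else row
    | none => row) (List.replicate ft.toNat " ' ")

def pvSeq (S : PySem.Dict Int (PySem.Dict String (List Int))) (ft : Int) (m : String) :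
    List (Int × Int × List Int) :=
  (pvI S ft).foldl (fun acc tnt =>
    match (S.getD tnt.1 PySem.Dict.empty).get? m with
    | some queue => acc ++ [(tnt.1, tnt.2, queue)]
    | none => acc) []

def pvRowB (S : PySem.Dict Int (PySem.Dict String (List Int))) (ft : Int) (m : String) (i : Nat) :
    List String :=
  (pvSeq S ft m).foldl (fun row tq =>
    if (i : Int) < (tq.2.2.length : Int) then
      pySpliceAssign row tq.1 tq.2.1
        (List.replicate (tq.2.1 - tq.1).toNat (" " ++ PySem.Int.toStr (PySem.List.pyGetD tq.2.2 (i : Int) 0) ++ " "))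
    else row)
    (List.replicate ft.toNat " ' ")

def pvGrid (S : PySem.Dict Int (PySem.Dict String (List Int))) (ft : Int) (m : String) :
    List (List String) :=
  (pvI S ft).foldl (pvGStep S m) (pvInitGrid ft (pvML S m))

-- the two ports, restated through the proof-side names (definitional)
lemma pvA_eq (states : List (Int × List (String × List Int))) (ft : Int) :
    get_queues_states_view states ft =
      PySem.List.sorted (pvViewFinal (pvToStatesDict states) ft).items (fun item => item.1) := rfl

lemma pvB_eq (states : List (Int × List (String × List Int))) (ft : Int) :
    get_queues_states_view_alt states ft =
      (PySem.List.sorted (((pvMaxB (pvToStatesDict states)).items.filter (fun p => 0 < p.2)).map (fun p => p.1)) (fun m => m)).map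
        (fun m => (m, (List.range ((pvMaxB (pvToStatesDict states)).getD m 0).toNat).map
          (pvRowB (pvToStatesDict states) ft m))) := rfl

-- generic: a foldl preserves an invariant
lemma pvFoldlInv {β σ : Type} (P : σ → Prop) (f : σ → β → σ)
    (h : ∀ s b, P s → P (f s b)) : ∀ (l : List β) (s : σ), P s → P (l.foldl f s) := by
  intro l
  induction l with
  | nil => intro s hs; exact hs
  | cons x xs ih => intro s hs; exact ih _ (h s x hs)

-- ===== max-length dictionaries =====

lemma pvGetD_innerA (d : PySem.Dict String Int) (p : String × List Int) (m : String) :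
    (pvInnerA d p).getD m 0 = pvMXstep m (d.getD m 0) p := by
  unfold pvInnerA pvMXstep
  rw [PySem.Dict.getD_setdefault_self]
  by_cases hp : p.1 = m
  · subst hp
    rw [if_pos rfl]
    split_ifs with h1
    · rw [PySem.Dict.getD_insert_self, max_eq_right (le_of_lt h1)]
    · rw [PySem.Dict.getD_setdefault_self, max_eq_left (by omega)]
  · have h2 : (d.setdefault p.1 0).getD m 0 = d.getD m 0 := by
      rw [PySem.Dict.getD_eq_get?_getD, PySem.Dict.get?_setdefault_of_ne d 0 (Ne.symm hp),
        ← PySem.Dict.getD_eq_get?_getD]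
    simp only [if_neg hp]
    split_ifs with h1
    · rw [PySem.Dict.getD_insert_of_ne _ _ _ (Ne.symm hp), h2]
    · exact h2

lemma pvGetD_innerB (d : PySem.Dict String Int) (p : String × List Int) (m : String) :
    (pvInnerB d p).getD m 0 = pvMXstep m (d.getD m 0) p := by
  unfold pvInnerB pvMXstep
  by_cases hp : p.1 = m
  · subst hp
    rw [if_pos rfl]
    split_ifs with h1
    · rw [PySem.Dict.getD_insert_self, max_eq_right (le_of_lt h1)]
    · rw [max_eq_left (by omega)]
  · simp only [if_neg hp]
    split_ifs with h1
    · rw [PySem.Dict.getD_insert_of_ne _ _ _ (Ne.symm hp)]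
    · rfl

lemma pvGetD_fold_pairs (step : PySem.Dict String Int → (String × List Int) → PySem.Dict String Int)
    (m : String) (hstep : ∀ d p, (step d p).getD m 0 = pvMXstep m (d.getD m 0) p) :
    ∀ (l : List (String × List Int)) (d : PySem.Dict String Int),
      (l.foldl step d).getD m 0 = l.foldl (pvMXstep m) (d.getD m 0) := by
  intro l
  induction l with
  | nil => intro d; rfl
  | cons p l ih => intro d; simp only [List.foldl_cons, ih, hstep]

-- nested fold over states, pointwise on one machine
lemma pvGetD_fold_states (step : PySem.Dict String Int → (String × List Int) → PySem.Dict String Int)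
    (m : String) (hstep : ∀ d p, (step d p).getD m 0 = pvMXstep m (d.getD m 0) p) :
    ∀ (L : List (PySem.Dict String (List Int))) (d : PySem.Dict String Int),
      ((L.foldl (fun d st => st.items.foldl step d) d).getD m 0) =
        (L.flatMap (fun st => st.items)).foldl (pvMXstep m) (d.getD m 0) := by
  intro L
  induction L with
  | nil => intro d; rfl
  | cons st L ih =>
    intro d
    simp only [List.foldl_cons, List.flatMap_cons, List.foldl_append, ih,
      pvGetD_fold_pairs step m hstep]

lemma pvGetD_maxA (S : PySem.Dict Int (PySem.Dict String (List Int))) (m : String) :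
    (pvMaxA S).getD m 0 = pvML S m := by
  unfold pvMaxA pvML pvPairsA
  rw [pvGetD_fold_states pvInnerA m (fun d p => pvGetD_innerA d p m), PySem.Dict.getD_empty]

-- pvMXstep is right-commutative (manual induction on the permutation; no instance may be declared)
lemma pvFoldl_MX_perm (m : String) :
    ∀ {l₁ l₂ : List (String × List Int)}, l₁.Perm l₂ →
      ∀ a, l₁.foldl (pvMXstep m) a = l₂.foldl (pvMXstep m) a := by
  intro l₁ l₂ h
  induction h with
  | nil => intro a; rfl
  | cons x _ ih => intro a; simp only [List.foldl_cons, ih]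
  | swap x y l =>
    intro a
    simp only [List.foldl_cons]
    have : pvMXstep m (pvMXstep m a y) x = pvMXstep m (pvMXstep m a x) y := by
      unfold pvMXstep
      split_ifs <;> simp [max_right_comm]
    rw [this]
  | trans _ _ ih₁ ih₂ => intro a; rw [ih₁, ih₂]

lemma pvPairsB_perm (S : PySem.Dict Int (PySem.Dict String (List Int))) (hnd : S.keys.Nodup) :
    ((pvTimes S).flatMap (fun t => (S.getD t PySem.Dict.empty).items)).Perm (pvPairsA S) := by
  unfold pvPairsA
  rw [PySem.Dict.values_eq_map_keys S hnd PySem.Dict.empty, List.flatMap_map]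
  exact List.Perm.flatMap (PySem.List.sorted_perm S.keys (fun t => t) false) (fun a _ => List.Perm.refl _)

lemma pvGetD_maxB (S : PySem.Dict Int (PySem.Dict String (List Int))) (hnd : S.keys.Nodup) (m : String) :
    (pvMaxB S).getD m 0 = pvML S m := by
  unfold pvMaxB pvML
  rw [show (pvTimes S).foldl (fun d t => (S.getD t PySem.Dict.empty).items.foldl pvInnerB d) PySem.Dict.empty
      = ((pvTimes S).map (fun t => S.getD t PySem.Dict.empty)).foldl
          (fun d st => st.items.foldl pvInnerB d) PySem.Dict.empty from
    (List.foldl_map (f := fun t => S.getD t PySem.Dict.empty)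
      (g := fun (d : PySem.Dict String Int) st => st.items.foldl pvInnerB d)).symm]
  rw [pvGetD_fold_states pvInnerB m (fun d p => pvGetD_innerB d p m), PySem.Dict.getD_empty,
    List.flatMap_map]
  exact pvFoldl_MX_perm m (pvPairsB_perm S hnd) 0

lemma pvFoldl_MX_le (m : String) :
    ∀ (l : List (String × List Int)) (a : Int), a ≤ l.foldl (pvMXstep m) a := by
  intro l
  induction l with
  | nil => intro a; exact le_refl a
  | cons p l ih =>
    intro a
    refine le_trans ?_ (ih (pvMXstep m a p))
    unfold pvMXstep; split_ifs <;> simp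

lemma pvML_ge (S : PySem.Dict Int (PySem.Dict String (List Int))) (p : String × List Int)
    (hp : p ∈ pvPairsA S) : (p.2.length : Int) ≤ pvML S p.1 := by
  unfold pvML
  revert hp
  generalize pvPairsA S = l
  intro hp
  have : ∀ (l : List (String × List Int)) (a : Int), p ∈ l →
      (p.2.length : Int) ≤ l.foldl (pvMXstep p.1) a := by
    intro l
    induction l with
    | nil => intro a h; cases h
    | cons q l ih =>
      intro a h
      rcases List.mem_cons.mp h with h | h
      · subst h
        refine le_trans ?_ (pvFoldl_MX_le p.1 l _)
        unfold pvMXstep; simp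
      · exact ih _ h
  exact this l 0 hp

lemma pvKeysNodup_innerA (d : PySem.Dict String Int) (p : String × List Int)
    (h : d.keys.Nodup) : (pvInnerA d p).keys.Nodup := by
  unfold pvInnerA
  have hsd : (d.setdefault p.1 0).keys.Nodup := by
    rw [PySem.Dict.keys_setdefault]
    split_ifs with hc
    · exact h
    · have hm : p.1 ∉ d.keys := fun hmem =>
        (by simp [hc] : ¬ d.contains p.1 = true) ((PySem.Dict.contains_iff_mem_keys d p.1).mpr hmem)
      refine (List.nodup_append).mpr ⟨h, List.nodup_singleton _, ?_⟩
      intro a ha b hb heq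
      rw [List.mem_singleton.mp hb] at heq
      exact hm (heq ▸ ha)
  have hcd : (d.setdefault p.1 0).contains p.1 = true := by
    rw [PySem.Dict.contains_setdefault]; simp
  split_ifs with h1
  · rw [PySem.Dict.keys_insert_of_contains _ _ hcd]; exact hsd
  · exact hsd

lemma pvKeysNodup_innerB (d : PySem.Dict String Int) (p : String × List Int)
    (h : d.keys.Nodup) : (pvInnerB d p).keys.Nodup := by
  unfold pvInnerB
  split_ifs with h1
  · rcases hc : d.contains p.1 with _ | _
    · rw [PySem.Dict.keys_insert_of_not_contains _ _ hc]
      have hm : p.1 ∉ d.keys := fun hmem =>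
        (by simp [hc] : ¬ d.contains p.1 = true) ((PySem.Dict.contains_iff_mem_keys d p.1).mpr hmem)
      refine (List.nodup_append).mpr ⟨h, List.nodup_singleton _, ?_⟩
      intro a ha b hb heq
      rw [List.mem_singleton.mp hb] at heq
      exact hm (heq ▸ ha)
    · rw [PySem.Dict.keys_insert_of_contains _ _ hc]; exact h
  · exact h

lemma pvNodup_keys_maxA (S : PySem.Dict Int (PySem.Dict String (List Int))) :
    (pvMaxA S).keys.Nodup := by
  unfold pvMaxA
  refine pvFoldlInv (fun (d : PySem.Dict String Int) => d.keys.Nodup) _ ?_ _ _ (by simp [PySem.Dict.keys_empty])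
  intro d st hd
  exact pvFoldlInv (fun (d : PySem.Dict String Int) => d.keys.Nodup) _ (fun d p hp => pvKeysNodup_innerA d p hp) _ _ hd

lemma pvNodup_keys_maxB (S : PySem.Dict Int (PySem.Dict String (List Int))) :
    (pvMaxB S).keys.Nodup := by
  unfold pvMaxB
  refine pvFoldlInv (fun (d : PySem.Dict String Int) => d.keys.Nodup) _ ?_ _ _ (by simp [PySem.Dict.keys_empty])
  intro d t hd
  exact pvFoldlInv (fun (d : PySem.Dict String Int) => d.keys.Nodup) _ (fun d p hp => pvKeysNodup_innerB d p hp) _ _ hd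

-- membership in the filtered item lists is exactly 0 < pvML
lemma pvMem_filtered (d : PySem.Dict String Int) (hnd : d.keys.Nodup) (m : String)
    (x : Int) (hx : d.getD m 0 = x) :
    m ∈ (d.items.filter (fun p => 0 < p.2)).map (fun p => p.1) ↔ 0 < x := by
  constructor
  · intro h
    obtain ⟨p, hpf, hpm⟩ := List.mem_map.mp h
    obtain ⟨hpi, hpv⟩ := List.mem_filter.mp hpf
    have : d.getD p.1 0 = p.2 := PySem.Dict.getD_of_mem_items d (by exact hpi) hnd 0
    rw [hpm, hx] at this
    rw [this]
    exact of_decide_eq_true hpv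
  · intro h
    have hk : m ∈ d.keys := by
      by_contra hk
      have hc : d.contains m = false := by
        rcases hcc : d.contains m with _ | _
        · rfl
        · exact absurd ((PySem.Dict.contains_iff_mem_keys d m).mp hcc) hk
      have := PySem.Dict.getD_of_not_contains d (0 : Int) hc
      rw [hx] at this; omega
    have hit : (m, x) ∈ d.items := by
      rw [PySem.Dict.items_eq_map_keys d hnd 0]
      exact List.mem_map.mpr ⟨m, hk, by rw [hx]⟩
    exact List.mem_map.mpr ⟨(m, x), List.mem_filter.mpr ⟨hit, by simpa using h⟩, rfl⟩
lemma pvMem_filtered_maxA (S : PySem.Dict Int (PySem.Dict String (List Int))) (m : String) :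
    m ∈ ((pvMaxA S).items.filter (fun p => 0 < p.2)).map (fun p => p.1) ↔ 0 < pvML S m :=
  pvMem_filtered (pvMaxA S) (pvNodup_keys_maxA S) m (pvML S m) (pvGetD_maxA S m)

lemma pvMem_filtered_maxB (S : PySem.Dict Int (PySem.Dict String (List Int))) (hnd : S.keys.Nodup) (m : String) :
    m ∈ ((pvMaxB S).items.filter (fun p => 0 < p.2)).map (fun p => p.1) ↔ 0 < pvML S m :=
  pvMem_filtered (pvMaxB S) (pvNodup_keys_maxB S) m (pvML S m) (pvGetD_maxB S hnd m)

-- ===== initial view dict =====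

lemma pvFilteredKeysNodup (d : PySem.Dict String Int) (hnd : d.keys.Nodup) :
    ((d.items.filter (fun p => decide (0 < p.2))).map (fun p => p.1)).Nodup := by
  have hs : ((d.items.filter (fun p => decide (0 < p.2))).map (fun p => p.1)).Sublist
      (d.items.map (fun p => p.1)) :=
    List.Sublist.map (fun (p : String × Int) => p.1)
      (List.filter_sublist (l := d.items) (p := fun p => decide (0 < p.2)))
  exact List.Nodup.sublist hs hnd

lemma pvView0_items (S : PySem.Dict Int (PySem.Dict String (List Int))) (ft : Int) :
    (pvView0 S ft).items =
      ((pvMaxA S).items.filter (fun p => decide (0 < p.2))).map (fun p => (p.1, pvInitGrid ft p.2)) := by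
  unfold pvView0
  rw [PySem.List.foldl_ite_eq_foldl_filter (fun (ml : String × Int) => 0 < ml.2)]
  have hnd := pvFilteredKeysNodup (pvMaxA S) (pvNodup_keys_maxA S)
  have hfr := PySem.Dict.items_foldl_insert_fresh
    (l := (pvMaxA S).items.filter (fun p => decide (0 < p.2)))
    (k := fun p => p.1) (v := fun p => pvInitGrid ft p.2) (d := PySem.Dict.empty)
    (fun a _ => PySem.Dict.contains_empty _) hnd
  rw [hfr]
  rfl

lemma pvView0_keys (S : PySem.Dict Int (PySem.Dict String (List Int))) (ft : Int) :
    (pvView0 S ft).keys = ((pvMaxA S).items.filter (fun p => decide (0 < p.2))).map (fun p => p.1) := by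
  show ((pvView0 S ft).items.map (fun p => p.1)) = _
  rw [pvView0_items, List.map_map]
  rfl

lemma pvView0_keys_nodup (S : PySem.Dict Int (PySem.Dict String (List Int))) (ft : Int) :
    (pvView0 S ft).keys.Nodup := by
  rw [pvView0_keys]
  exact pvFilteredKeysNodup (pvMaxA S) (pvNodup_keys_maxA S)

lemma pvView0_getD (S : PySem.Dict Int (PySem.Dict String (List Int))) (ft : Int) (m : String)
    (hm : m ∈ (pvView0 S ft).keys) : (pvView0 S ft).getD m [] = pvInitGrid ft (pvML S m) := by
  rw [pvView0_keys] at hm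
  obtain ⟨p, hpf, hpm⟩ := List.mem_map.mp hm
  have hpi : p ∈ (pvMaxA S).items := (List.mem_filter.mp hpf).1
  have hval : (pvMaxA S).getD p.1 0 = p.2 :=
    PySem.Dict.getD_of_mem_items (pvMaxA S) (by exact hpi) (pvNodup_keys_maxA S) 0
  have hml : p.2 = pvML S m := by rw [← hval, hpm, pvGetD_maxA]
  have hit : (m, pvInitGrid ft (pvML S m)) ∈ (pvView0 S ft).items := by
    rw [pvView0_items]
    exact List.mem_map.mpr ⟨p, hpf, by rw [hpm, hml]⟩
  exact PySem.Dict.getD_of_mem_items _ hit (pvView0_keys_nodup S ft) []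

-- ===== the interval fold, pointwise per machine =====

lemma pvGetD_u (tnt : Int × Int) (p : String × List Int)
    (v : PySem.Dict String (List (List String))) (m : String) :
    (pvU tnt p v).getD m [] =
      if p.1 = m then pvUpdGrid tnt p.2 (v.getD m []) else v.getD m [] := by
  unfold pvU pvUpdGrid
  generalize PySem.List.enumerate p.2 = l
  induction l generalizing v with
  | nil => simp
  | cons id_ l ih =>
    simp only [List.foldl_cons]
    rw [ih]
    by_cases hp : p.1 = m
    · subst hp
      rw [if_pos rfl, if_pos rfl, PySem.Dict.getD_modify]
      rw [if_pos rfl]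
    · rw [if_neg hp, if_neg hp, PySem.Dict.getD_modify, if_neg (fun h => hp h.symm)]

lemma pvKeys_u (tnt : Int × Int) (p : String × List Int)
    (v : PySem.Dict String (List (List String))) (h : p.1 ∈ v.keys ∨ p.2 = []) :
    (pvU tnt p v).keys = v.keys := by
  unfold pvU
  rcases h with h | h
  · generalize PySem.List.enumerate p.2 = l
    induction l generalizing v with
    | nil => rfl
    | cons id_ l ih =>
      simp only [List.foldl_cons]
      have hk : (v.modify p.1 [] (pvF tnt id_)).keys = v.keys := by
        rw [PySem.Dict.keys_modify,
          PySem.Dict.keys_insert_of_contains _ _ ((PySem.Dict.contains_iff_mem_keys _ _).mpr h)]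
      rw [ih _ (by rw [hk]; exact h), hk]
  · rw [h]
    rfl

lemma pvGetD_fold_ne (tnt : Int × Int) (m : String) :
    ∀ (l : List (String × List Int)), (∀ p ∈ l, p.1 ≠ m) →
      ∀ (v : PySem.Dict String (List (List String))),
        (l.foldl (fun v p => pvU tnt p v) v).getD m [] = v.getD m [] := by
  intro l
  induction l with
  | nil => intro _ v; rfl
  | cons p l ih =>
    intro h v
    simp only [List.foldl_cons]
    rw [ih (fun q hq => h q (List.mem_cons_of_mem p hq)) _, pvGetD_u,
      if_neg (h p (List.mem_cons_self ..))]

lemma pvKeys_W (tnt : Int × Int) :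
    ∀ (l : List (String × List Int)) (v : PySem.Dict String (List (List String))),
      (∀ p ∈ l, p.2 ≠ [] → p.1 ∈ v.keys) →
      (l.foldl (fun v p => pvU tnt p v) v).keys = v.keys := by
  intro l
  induction l with
  | nil => intro v _; rfl
  | cons p l ih =>
    intro v h
    simp only [List.foldl_cons]
    have hk : (pvU tnt p v).keys = v.keys := by
      by_cases hq : p.2 = []
      · exact pvKeys_u tnt p v (Or.inr hq)
      · exact pvKeys_u tnt p v (Or.inl (h p (List.mem_cons_self ..) hq))
    rw [ih _ (by rw [hk]; exact fun q hq hq2 => h q (List.mem_cons_of_mem p hq) hq2), hk]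

lemma pvGetD_W (S : PySem.Dict Int (PySem.Dict String (List Int))) (tnt : Int × Int)
    (hnd : (S.getD tnt.1 PySem.Dict.empty).keys.Nodup)
    (v : PySem.Dict String (List (List String))) (m : String) :
    (((S.getD tnt.1 PySem.Dict.empty).items).foldl (fun v p => pvU tnt p v) v).getD m [] =
      pvGStep S m (v.getD m []) tnt := by
  unfold pvGStep
  rcases h : (S.getD tnt.1 PySem.Dict.empty).get? m with _ | q
  · have hnm : ∀ p ∈ (S.getD tnt.1 PySem.Dict.empty).items, p.1 ≠ m := by
      intro p hp hpm
      exact (PySem.Dict.get?_eq_none_iff_not_mem_keys _ _).mp h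
        (hpm ▸ PySem.Dict.mem_keys_of_mem_items _ hp)
    exact pvGetD_fold_ne tnt m _ hnm v
  · have hmem : (m, q) ∈ (S.getD tnt.1 PySem.Dict.empty).items :=
      PySem.Dict.mem_items_of_get?_eq_some _ h
    obtain ⟨l₁, l₂, hsplit⟩ := List.append_of_mem hmem
    have hnd' : ((l₁ ++ (m, q) :: l₂).map (fun p => p.1)).Nodup := by
      rw [← hsplit]; exact hnd
    simp only [List.map_append, List.map_cons, List.nodup_append] at hnd'
    have h1 : ∀ p ∈ l₁, p.1 ≠ m := by
      intro p hp hpm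
      exact hnd'.2.2 p.1 (List.mem_map_of_mem hp) m (by simp) hpm
    have h2 : ∀ p ∈ l₂, p.1 ≠ m := by
      intro p hp hpm
      have := hnd'.2.1
      rw [List.nodup_cons] at this
      exact this.1 (hpm ▸ List.mem_map_of_mem hp)
    rw [hsplit, List.foldl_append, List.foldl_cons]
    rw [pvGetD_fold_ne tnt m l₂ h2, pvGetD_u, if_pos rfl, pvGetD_fold_ne tnt m l₁ h1]

lemma pvViewFinal_keys_getD (S : PySem.Dict Int (PySem.Dict String (List Int))) (ft : Int)
    (hmq : ∀ t, (S.getD t PySem.Dict.empty).keys.Nodup)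
    (hH : ∀ tnt ∈ pvI S ft, ∀ p ∈ (S.getD tnt.1 PySem.Dict.empty).items,
        p.2 ≠ [] → p.1 ∈ (pvView0 S ft).keys) :
    (pvViewFinal S ft).keys = (pvView0 S ft).keys ∧
    ∀ m, (pvViewFinal S ft).getD m [] = (pvI S ft).foldl (pvGStep S m) ((pvView0 S ft).getD m []) := by
  unfold pvViewFinal
  have gen : ∀ (I' : List (Int × Int)),
      (∀ tnt ∈ I', ∀ p ∈ (S.getD tnt.1 PySem.Dict.empty).items,
        p.2 ≠ [] → p.1 ∈ (pvView0 S ft).keys) →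
      ∀ v : PySem.Dict String (List (List String)), v.keys = (pvView0 S ft).keys →
      (I'.foldl (fun v tnt => ((S.getD tnt.1 PySem.Dict.empty).items).foldl (fun v p => pvU tnt p v) v) v).keys
          = (pvView0 S ft).keys ∧
      ∀ m, (I'.foldl (fun v tnt => ((S.getD tnt.1 PySem.Dict.empty).items).foldl (fun v p => pvU tnt p v) v) v).getD m []
          = I'.foldl (pvGStep S m) (v.getD m []) := by
    intro I'
    induction I' with
    | nil => intro _ v hv; exact ⟨hv, fun m => rfl⟩
    | cons tnt I' ih =>
      intro hH' v hv
      simp only [List.foldl_cons]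
      have hWkeys : (((S.getD tnt.1 PySem.Dict.empty).items).foldl (fun v p => pvU tnt p v) v).keys = (pvView0 S ft).keys := by
        rw [pvKeys_W tnt _ v (fun p hp hq => by
          rw [hv]; exact hH' tnt (List.mem_cons_self ..) p hp hq)]
        exact hv
      obtain ⟨hk, hg⟩ := ih (fun t ht p hp hq => hH' t (List.mem_cons_of_mem tnt ht) p hp hq) _ hWkeys
      refine ⟨hk, fun m => ?_⟩
      rw [hg m, pvGetD_W S tnt (hmq tnt.1) v m]
  exact gen (pvI S ft) hH (pvView0 S ft) rfl

-- ===== grids row by row =====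


lemma pvGetElem?_updGrid (tnt : Int × Int) (q : List Int) (g : List (List String)) (j : Nat) :
    (pvUpdGrid tnt q g)[j]? =
      if h : j < q.length then
        (g[j]?).map (fun r => pySpliceAssign r tnt.1 tnt.2 (pvCellRepl tnt.1 tnt.2 q[j]))
      else g[j]? := by
  have gen : ∀ (q : List Int) (s : Nat) (g : List (List String)),
      ((PySem.List.enumerate q (s : Int)).foldl (fun g id_ => pvF tnt id_ g) g)[j]? =
        if h : s ≤ j ∧ j - s < q.length then
          (g[j]?).map (fun r => pySpliceAssign r tnt.1 tnt.2 (pvCellRepl tnt.1 tnt.2 (q[j - s]'h.2)))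
        else g[j]? := by
    intro q
    induction q with
    | nil =>
      intro s g
      rw [dif_neg (by simp only [List.length_nil]; omega)]
      rfl
    | cons x q ih =>
      intro s g
      rw [PySem.List.enumerate_cons, List.foldl_cons]
      have hcast : ((s : Int) + 1) = ((s + 1 : Nat) : Int) := by push_cast; ring
      rw [hcast]
      have hstep : pvF tnt ((s : Int), x) g =
          g.set s (pySpliceAssign (g.getD s []) tnt.1 tnt.2 (pvCellRepl tnt.1 tnt.2 x)) := by
        unfold pvF
        rw [PySem.List.pySetD_natCast, PySem.List.pyGetD_natCast]
      rw [hstep, ih (s + 1)]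
      by_cases hj : j = s
      · subst hj
        rw [dif_neg (by omega), dif_pos (by simp only [List.length_cons]; omega)]
        rw [List.getElem?_set, if_pos rfl]
        simp only [Nat.sub_self]
        rcases hlt : decide (j < g.length) with _ | _
        · have hge : ¬ j < g.length := by simpa using hlt
          rw [if_neg hge]
          have : g[j]? = none := by rw [List.getElem?_eq_none_iff]; omega
          rw [this]
          rfl
        · have hlt' : j < g.length := by simpa using hlt
          rw [if_pos hlt']
          have : g[j]? = some (g[j]'hlt') := List.getElem?_eq_getElem hlt'
          rw [this]
          simp only [Option.map_some, List.getElem_cons_zero]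
          rw [List.getD_eq_getElem?_getD, this]
          rfl
      · have hset : (g.set s (pySpliceAssign (g.getD s []) tnt.1 tnt.2 (pvCellRepl tnt.1 tnt.2 x)))[j]? = g[j]? := by
          rw [List.getElem?_set, if_neg (fun h => hj h.symm)]
        by_cases hcond : s + 1 ≤ j ∧ j - (s + 1) < q.length
        · rw [dif_pos hcond, dif_pos (by simp only [List.length_cons] at *; omega), hset]
          congr 1
          have : j - s = (j - (s + 1)) + 1 := by omega
          simp only [this, List.getElem_cons_succ]
        · rw [dif_neg hcond, dif_neg (by simp only [List.length_cons] at *; omega), hset]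
  have := gen q 0 g
  rw [show ((0 : Nat) : Int) = (0 : Int) from rfl] at this
  unfold pvUpdGrid
  rw [show PySem.List.enumerate q = PySem.List.enumerate q (0 : Int) from rfl, this]
  by_cases h : j < q.length
  · rw [dif_pos (by omega), dif_pos h]
    simp
  · rw [dif_neg (by omega), dif_neg h]

-- one interval applied to a grid, seen row by row
lemma pvGetElem?_gstep (S : PySem.Dict Int (PySem.Dict String (List Int))) (m : String)
    (g : List (List String)) (tnt : Int × Int) (j : Nat) :
    (pvGStep S m g tnt)[j]? = (g[j]?).map (fun r =>
      match (S.getD tnt.1 PySem.Dict.empty).get? m with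
      | some queue =>
        if (j : Int) < (queue.length : Int) then
          pySpliceAssign r tnt.1 tnt.2
            (List.replicate (tnt.2 - tnt.1).toNat (" " ++ PySem.Int.toStr (PySem.List.pyGetD queue (j : Int) 0) ++ " "))
        else r
      | none => r) := by
  unfold pvGStep
  rcases hq : (S.getD tnt.1 PySem.Dict.empty).get? m with _ | q
  · cases g[j]? <;> rfl
  · rw [pvGetElem?_updGrid]
    by_cases h : j < q.length
    · rw [dif_pos h]
      cases hg : g[j]? with
      | none => rfl
      | some r =>
        simp only [Option.map_some]
        have h1 : ((j : Int) < (q.length : Int)) := by exact_mod_cast h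
        rw [if_pos h1]
        have h2 : PySem.List.pyGetD q (j : Int) 0 = q[j]'h := by
          rw [PySem.List.pyGetD_natCast, List.getD_eq_getElem?_getD, List.getElem?_eq_getElem h]
          rfl
        rw [h2]
        rfl
    · rw [dif_neg h]
      cases hg : g[j]? with
      | none => rfl
      | some r =>
        simp only [Option.map_some]
        rw [if_neg (by exact_mod_cast h)]

lemma pvGetElem?_gfold (S : PySem.Dict Int (PySem.Dict String (List Int))) (m : String) (j : Nat) :
    ∀ (I' : List (Int × Int)) (g : List (List String)),
      (I'.foldl (pvGStep S m) g)[j]? = (g[j]?).map (fun r => I'.foldl (fun row tnt =>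
        match (S.getD tnt.1 PySem.Dict.empty).get? m with
        | some queue =>
          if (j : Int) < (queue.length : Int) then
            pySpliceAssign row tnt.1 tnt.2
              (List.replicate (tnt.2 - tnt.1).toNat (" " ++ PySem.Int.toStr (PySem.List.pyGetD queue (j : Int) 0) ++ " "))
          else row
        | none => row) r) := by
  intro I'
  induction I' with
  | nil =>
    intro g
    rw [List.foldl_nil]
    cases g[j]? <;> rfl
  | cons tnt I' ih =>
    intro g
    simp only [List.foldl_cons]
    rw [ih, pvGetElem?_gstep, Option.map_map]
    rfl

lemma pvGrid_eq_rows (S : PySem.Dict Int (PySem.Dict String (List Int))) (ft : Int) (m : String) :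
    pvGrid S ft m = (List.range (pvML S m).toNat).map (pvRow S ft m) := by
  apply List.ext_getElem?
  intro j
  unfold pvGrid
  rw [pvGetElem?_gfold, List.getElem?_map]
  unfold pvInitGrid
  rw [List.getElem?_replicate]
  by_cases h : j < (pvML S m).toNat
  · rw [if_pos h, List.getElem?_range h]
    rfl
  · rw [if_neg h, List.getElem?_eq_none_iff.mpr (by simpa using h)]
    rfl

lemma pvSeq_eq_filterMap (S : PySem.Dict Int (PySem.Dict String (List Int))) (ft : Int) (m : String) :
    pvSeq S ft m = (pvI S ft).filterMap (fun tnt =>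
      ((S.getD tnt.1 PySem.Dict.empty).get? m).map (fun q => (tnt.1, tnt.2, q))) := by
  unfold pvSeq
  have gen : ∀ (l : List (Int × Int)) (acc : List (Int × Int × List Int)),
      l.foldl (fun acc tnt =>
        match (S.getD tnt.1 PySem.Dict.empty).get? m with
        | some queue => acc ++ [(tnt.1, tnt.2, queue)]
        | none => acc) acc
      = acc ++ l.filterMap (fun tnt =>
          ((S.getD tnt.1 PySem.Dict.empty).get? m).map (fun q => (tnt.1, tnt.2, q))) := by
    intro l
    induction l with
    | nil => intro acc; simp
    | cons tnt l ih =>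
      intro acc
      rw [List.foldl_cons, List.filterMap_cons]
      rcases (S.getD tnt.1 PySem.Dict.empty).get? m with _ | q
      · exact ih acc
      · rw [ih]
        simp
  rw [gen, List.nil_append]

lemma pvRowB_eq_pvRow (S : PySem.Dict Int (PySem.Dict String (List Int))) (ft : Int)
    (m : String) (i : Nat) : pvRowB S ft m i = pvRow S ft m i := by
  unfold pvRowB pvRow
  rw [pvSeq_eq_filterMap]
  have gen : ∀ (l : List (Int × Int)) (row : List String),
      (l.filterMap (fun tnt =>
        ((S.getD tnt.1 PySem.Dict.empty).get? m).map (fun q => (tnt.1, tnt.2, q)))).foldl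
        (fun row tq =>
          if (i : Int) < (tq.2.2.length : Int) then
            pySpliceAssign row tq.1 tq.2.1
              (List.replicate (tq.2.1 - tq.1).toNat (" " ++ PySem.Int.toStr (PySem.List.pyGetD tq.2.2 (i : Int) 0) ++ " "))
          else row) row
      = l.foldl (fun row tnt =>
          match (S.getD tnt.1 PySem.Dict.empty).get? m with
          | some queue =>
            if (i : Int) < (queue.length : Int) then
              pySpliceAssign row tnt.1 tnt.2
                (List.replicate (tnt.2 - tnt.1).toNat (" " ++ PySem.Int.toStr (PySem.List.pyGetD queue (i : Int) 0) ++ " "))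
            else row
          | none => row) row := by
    intro l
    induction l with
    | nil => intro row; rfl
    | cons tnt l ih =>
      intro row
      rw [List.filterMap_cons, List.foldl_cons]
      rcases (S.getD tnt.1 PySem.Dict.empty).get? m with _ | q
      · exact ih row
      · exact ih _
  rw [gen]

-- ===== assembly =====

lemma pvValues_ofList {κ ν : Type} [BEq κ] [LawfulBEq κ] (ps : List (κ × ν)) (w : ν)
    (hw : w ∈ (PySem.Dict.ofList ps).values) : w ∈ ps.map (fun p => p.2) := by
  have gen : ∀ (ps : List (κ × ν)) (d : PySem.Dict κ ν),
      w ∈ (ps.foldl (fun d p => d.insert p.1 p.2) d).values → w ∈ ps.map (fun p => p.2) ∨ w ∈ d.values := by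
    intro ps
    induction ps with
    | nil => intro d h; exact Or.inr h
    | cons p ps ih =>
      intro d h
      rcases ih _ h with h | h
      · exact Or.inl (List.mem_cons_of_mem _ h)
      · rcases PySem.Dict.mem_values_insert d p.1 p.2 w h with h | h
        · exact Or.inl (h ▸ List.mem_cons_self ..)
        · exact Or.inr h
  rcases gen ps PySem.Dict.empty hw with h | h
  · exact h
  · cases h

lemma pvMem_values (S : PySem.Dict Int (PySem.Dict String (List Int))) (t : Int)
    (v : PySem.Dict String (List Int)) (h : S.get? t = some v) : v ∈ S.values :=
  List.mem_map_of_mem (PySem.Dict.mem_items_of_get?_eq_some S h)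

lemma pvMQ_nodup (states : List (Int × List (String × List Int))) (t : Int) :
    ((pvToStatesDict states).getD t PySem.Dict.empty).keys.Nodup := by
  rcases h : (pvToStatesDict states).get? t with _ | v
  · rw [PySem.Dict.getD_of_get?_eq_none _ _ h]
    simp [PySem.Dict.keys_empty]
  · rw [PySem.Dict.getD_of_get?_eq_some _ _ h]
    have hv := pvValues_ofList _ v (pvMem_values _ t v h)
    rw [List.map_map] at hv
    obtain ⟨p, _, hp⟩ := List.mem_map.mp hv
    rw [← hp]
    exact PySem.Dict.nodup_keys_ofList _

lemma pvH (states : List (Int × List (String × List Int))) (ft : Int) :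
    ∀ tnt ∈ pvI (pvToStatesDict states) ft,
      ∀ p ∈ ((pvToStatesDict states).getD tnt.1 PySem.Dict.empty).items,
        p.2 ≠ [] → p.1 ∈ (pvView0 (pvToStatesDict states) ft).keys := by
  intro tnt htnt p hp hq
  obtain ⟨t, nt⟩ := tnt
  have ht : t ∈ pvTimes (pvToStatesDict states) := (List.of_mem_zip htnt).1
  have htk : t ∈ (pvToStatesDict states).keys := (PySem.List.mem_sorted _ _ _ _).mp ht
  rcases hg : (pvToStatesDict states).get? t with _ | v
  · exact absurd htk ((PySem.Dict.get?_eq_none_iff_not_mem_keys _ _).mp hg)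
  · rw [PySem.Dict.getD_of_get?_eq_some _ _ hg] at hp
    have hpairs : p ∈ pvPairsA (pvToStatesDict states) :=
      List.mem_flatMap.mpr ⟨v, pvMem_values _ t v hg, hp⟩
    have hml : (p.2.length : Int) ≤ pvML (pvToStatesDict states) p.1 :=
      pvML_ge _ p hpairs
    have hpos : 0 < pvML (pvToStatesDict states) p.1 := by
      have : 0 < p.2.length := List.length_pos_of_ne_nil hq
      omega
    rw [pvView0_keys]
    exact (pvMem_filtered_maxA _ p.1).mpr hpos

theorem pvMain (states : List (Int × List (String × List Int))) (ft : Int) :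
    get_queues_states_view states ft = get_queues_states_view_alt states ft := by
  have hndS : (pvToStatesDict states).keys.Nodup := PySem.Dict.nodup_keys_ofList _
  obtain ⟨hkeys, hgetD⟩ :=
    pvViewFinal_keys_getD (pvToStatesDict states) ft (pvMQ_nodup states) (pvH states ft)
  rw [pvA_eq, pvB_eq]
  have hgB : ∀ m, (List.range ((pvMaxB (pvToStatesDict states)).getD m 0).toNat).map
      (pvRowB (pvToStatesDict states) ft m)
      = (List.range (pvML (pvToStatesDict states) m).toNat).map (pvRow (pvToStatesDict states) ft m) := by
    intro m
    rw [pvGetD_maxB _ hndS m]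
    exact List.map_congr_left (fun i _ => pvRowB_eq_pvRow _ ft m i)
  have hitems : (pvViewFinal (pvToStatesDict states) ft).items =
      (pvView0 (pvToStatesDict states) ft).keys.map
        (fun m => (m, (List.range (pvML (pvToStatesDict states) m).toNat).map (pvRow (pvToStatesDict states) ft m))) := by
    rw [PySem.Dict.items_eq_map_keys _ (by rw [hkeys]; exact pvView0_keys_nodup _ ft) [], hkeys]
    apply List.map_congr_left
    intro m hm
    have : (pvViewFinal (pvToStatesDict states) ft).getD m [] =
        (List.range (pvML (pvToStatesDict states) m).toNat).map (pvRow (pvToStatesDict states) ft m) := by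
      rw [hgetD m, pvView0_getD _ ft m hm,
        show (pvI (pvToStatesDict states) ft).foldl (pvGStep (pvToStatesDict states) m)
          (pvInitGrid ft (pvML (pvToStatesDict states) m)) = pvGrid (pvToStatesDict states) ft m from rfl,
        pvGrid_eq_rows]
    rw [this]
  have hndB : (((pvMaxB (pvToStatesDict states)).items.filter (fun p => 0 < p.2)).map (fun p => p.1)).Nodup :=
    pvFilteredKeysNodup _ (pvNodup_keys_maxB _)
  have hndsort : (PySem.List.sorted (((pvMaxB (pvToStatesDict states)).items.filter (fun p => 0 < p.2)).map (fun p => p.1)) (fun m => m)).Nodup :=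
    (PySem.List.sorted_perm _ _ false).nodup_iff.mpr hndB
  have hperm : (PySem.List.sorted (((pvMaxB (pvToStatesDict states)).items.filter (fun p => 0 < p.2)).map (fun p => p.1)) (fun m => m)).Perm
      ((pvView0 (pvToStatesDict states) ft).keys) := by
    refine (List.perm_ext_iff_of_nodup hndsort (pvView0_keys_nodup _ ft)).mpr ?_
    intro a
    rw [PySem.List.mem_sorted, pvView0_keys]
    exact (pvMem_filtered_maxB _ hndS a).trans (pvMem_filtered_maxA _ a).symm
  have hpw : (PySem.List.sorted (((pvMaxB (pvToStatesDict states)).items.filter (fun p => 0 < p.2)).map (fun p => p.1)) (fun m => m)).Pairwise (· < ·) := by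
    have hle := PySem.List.sorted_pairwise (((pvMaxB (pvToStatesDict states)).items.filter (fun p => 0 < p.2)).map (fun p => p.1)) (fun m => m)
    exact (hle.and hndsort).imp (fun h => lt_of_le_of_ne h.1 h.2)
  rw [hitems]
  have hmapB : (PySem.List.sorted (((pvMaxB (pvToStatesDict states)).items.filter (fun p => 0 < p.2)).map (fun p => p.1)) (fun m => m)).map
        (fun m => (m, (List.range ((pvMaxB (pvToStatesDict states)).getD m 0).toNat).map (pvRowB (pvToStatesDict states) ft m)))
      = (PySem.List.sorted (((pvMaxB (pvToStatesDict states)).items.filter (fun p => 0 < p.2)).map (fun p => p.1)) (fun m => m)).map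
        (fun m => (m, (List.range (pvML (pvToStatesDict states) m).toNat).map (pvRow (pvToStatesDict states) ft m))) := by
    apply List.map_congr_left
    intro m _
    rw [hgB m]
  rw [hmapB]
  apply PySem.List.sorted_eq_of_perm_of_pairwise_lt
  · exact hperm.map _
  · rw [List.pairwise_map]
    exact hpw

-- ===== VERDICT (by name: the statement is the Claim_ definition above) =====
theorem get_queues_states_view_spec : Claim_equal_get_queues_states_view := by
  intro states full_time _
  unfold Spec_get_queues_states_view
  exact pvMain states full_time
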